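-- pv_equiv track=rewrite | github.com/L4KK4S/AutoPy | automaton.py | check_doublons_str
-- ===== SOURCE A (Python) =====
-- def check_doublons_str(chaine):
--     chaine = ''.join(sorted(chaine))
--     resultat = ''
--     i = 0
--     while i < len(chaine):
--         count = 0
--         while i + 1 < len(chaine) and chaine[i] == chaine[i + 1]:
--             i += 1
--             count += 1
--         if count < 2:
--             resultat += chaine[i]
--         i += 1
--     return resultat
-- ===== SOURCE B (Python) =====
-- def check_doublons_str(chaine):
--     return ''.join(c for c in sorted(set(chaine)) if chaine.count(c) <= 2)
-- ===== Notes on version B (the rewrite author's own statement) =====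
-- stated objective: idiomatic
-- what changed: A sorts the whole string and scans adjacent runs with a nested index while-loop; B iterates the sorted distinct characters and keeps those whose count in the original string is <= 2, joined in one comprehension.
import Mathlib
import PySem

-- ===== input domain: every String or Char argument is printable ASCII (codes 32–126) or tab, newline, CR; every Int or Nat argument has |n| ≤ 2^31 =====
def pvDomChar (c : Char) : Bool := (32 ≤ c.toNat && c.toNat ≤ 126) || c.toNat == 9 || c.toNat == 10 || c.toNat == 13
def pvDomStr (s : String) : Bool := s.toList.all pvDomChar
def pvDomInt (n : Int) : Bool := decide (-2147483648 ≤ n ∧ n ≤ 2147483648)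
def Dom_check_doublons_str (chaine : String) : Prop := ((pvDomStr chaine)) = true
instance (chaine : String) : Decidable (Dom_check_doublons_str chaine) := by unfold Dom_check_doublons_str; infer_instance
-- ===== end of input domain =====

-- B replaces A's sort-then-scan-adjacent-runs (nested while over indices) by the idiomatic
-- 'sorted distinct chars, keep those with count ≤ 2' one-liner; same return value.

-- ===== PORT A =====
-- inner while: while chaine[i] == chaine[i+1]: i += 1; count += 1 — counts the leading
-- elements of the rest equal to the current char
def pvLeadRun (c : Char) : List Char → Nat
  | [] => 0
  | d :: rest => if d = c then pvLeadRun c rest + 1 else 0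

-- outer while over the sorted chars: at each run head take count, append the char if
-- count < 2, jump i past the run
def pvLoopA : List Char → List Char
  | [] => []
  | c :: rest =>
    let k := pvLeadRun c rest
    (if k < 2 then [c] else []) ++ pvLoopA (rest.drop k)
termination_by l => l.length
decreasing_by simp

def check_doublons_str (chaine : String) : String :=
  String.ofList (pvLoopA (PySem.List.sorted chaine.toList (fun x => x) false))

-- ===== PORT B =====
-- ''.join(c for c in sorted(set(chaine)) if chaine.count(c) <= 2)
-- str.count with a single-character needle is exactly the List.count of that char
def check_doublons_str_alt (chaine : String) : String :=
  String.ofList ((PySem.List.sorted (PySem.Set.ofList chaine.toList) (fun x => x) false).filter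
    (fun c => chaine.toList.count c ≤ 2))

-- ===== PRECONDITION & SPEC =====
def Spec_check_doublons_str (chaine : String) (out : String) : Prop := out = check_doublons_str_alt chaine
instance (chaine : String) (out : String) : Decidable (Spec_check_doublons_str chaine out) := by unfold Spec_check_doublons_str; infer_instance

-- ===== CLAIM (what is proved, stated in full; the proofs are below) =====
def Claim_equal_check_doublons_str : Prop := ∀ (chaine : String), Dom_check_doublons_str chaine → Spec_check_doublons_str chaine (check_doublons_str chaine)

-- ===== LEMMAS AND PROOFS =====

-- the inner while takes a whole block of equal chars: the leading run is a replicate prefix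
theorem pvLeadRun_take (c : Char) (rest : List Char) :
    rest.take (pvLeadRun c rest) = List.replicate (pvLeadRun c rest) c := by
  induction rest with
  | nil => simp [pvLeadRun]
  | cons d t ih =>
    by_cases h : d = c
    · subst h; simp [pvLeadRun, List.replicate_succ, ih]
    · simp [pvLeadRun, h]

-- on a sorted tail whose elements are all ≥ c, c does not occur past its leading run
theorem pvLeadRun_not_mem (c : Char) (rest : List Char)
    (hs : rest.Pairwise (· ≤ ·)) (hc : ∀ x ∈ rest, c ≤ x) :
    c ∉ rest.drop (pvLeadRun c rest) := by
  induction rest with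
  | nil => simp [pvLeadRun]
  | cons d t ih =>
    by_cases h : d = c
    · subst h
      simp only [pvLeadRun, if_pos]
      exact ih hs.tail (fun x hx => (List.pairwise_cons.mp hs).1 x hx)
    · simp only [pvLeadRun, if_neg h, List.drop_zero]
      intro hmem
      rcases List.mem_cons.mp hmem with hcd | hct
      · exact h hcd.symm
      · have hdc : c ≤ d := hc d (List.mem_cons_self)
        have hdx : d ≤ c := (List.pairwise_cons.mp hs).1 c hct
        exact h (le_antisymm hdx hdc)

-- count of the run head in the tail equals the run length
theorem pvCount_eq (c : Char) (rest : List Char)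
    (hs : rest.Pairwise (· ≤ ·)) (hc : ∀ x ∈ rest, c ≤ x) :
    rest.count c = pvLeadRun c rest := by
  set k := pvLeadRun c rest with hk
  have hsplit : rest = rest.take k ++ rest.drop k := (List.take_append_drop k rest).symm
  have h1 : (rest.take k).count c = k := by
    rw [pvLeadRun_take]; simp [hk]
  have h2 : (rest.drop k).count c = 0 :=
    List.count_eq_zero.mpr (pvLeadRun_not_mem c rest hs hc)
  calc rest.count c = (rest.take k ++ rest.drop k).count c := by rw [← hsplit]
    _ = k := by rw [List.count_append, h1, h2]; omega

-- counts of other chars survive dropping the run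
theorem pvCount_drop (c x : Char) (rest : List Char) (hx : x ≠ c) :
    (rest.drop (pvLeadRun c rest)).count x = rest.count x := by
  set k := pvLeadRun c rest with hk
  have h1 : (rest.take k).count x = 0 := by
    rw [pvLeadRun_take]; simp [List.count_replicate]
    intro h; exact absurd h.symm hx
  calc (rest.drop k).count x = (rest.take k ++ rest.drop k).count x := by
        rw [List.count_append, h1]; omega
    _ = rest.count x := by rw [List.take_append_drop]

-- main characterisation of A's loop: on a sorted list it filters any strictly sorted
-- enumeration of its distinct elements by multiplicity ≤ 2
theorem pvLoopA_eq (n : Nat) : ∀ (l ds : List Char), l.length ≤ n →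
    l.Pairwise (· ≤ ·) → ds.Pairwise (· < ·) → (∀ x, x ∈ ds ↔ x ∈ l) →
    pvLoopA l = ds.filter (fun c => l.count c ≤ 2) := by
  induction n with
  | zero =>
    intro l ds hn _ _ hmem
    have hl : l = [] := List.eq_nil_of_length_eq_zero (by omega)
    subst hl
    have : ds = [] := List.eq_nil_iff_forall_not_mem.mpr (fun x hx => by simpa using (hmem x).mp hx)
    simp [this, pvLoopA]
  | succ n ih =>
    intro l ds hn hl hds hmem
    match l with
    | [] =>
      have : ds = [] := List.eq_nil_iff_forall_not_mem.mpr (fun x hx => by simpa using (hmem x).mp hx)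
      simp [this, pvLoopA]
    | c :: rest =>
      have hcle : ∀ x ∈ rest, c ≤ x := (List.pairwise_cons.mp hl).1
      have hrs : rest.Pairwise (· ≤ ·) := hl.tail
      set k := pvLeadRun c rest with hkdef
      have hknm : c ∉ rest.drop k := pvLeadRun_not_mem c rest hrs hcle
      have hcnt : rest.count c = k := pvCount_eq c rest hrs hcle
      -- ds starts with c
      have hcds : c ∈ ds := (hmem c).mpr List.mem_cons_self
      match ds with
      | [] => exact absurd hcds (by simp)
      | e :: ds' =>
        have he : e = c := by
          rcases List.mem_cons.mp hcds with h | h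
          · exact h.symm
          · have h1 : e < c := (List.pairwise_cons.mp hds).1 c h
            have h2 : e ∈ c :: rest := (hmem e).mp List.mem_cons_self
            rcases List.mem_cons.mp h2 with h3 | h3
            · exact h3
            · exact absurd (hcle e h3) (not_le.mpr h1)
        subst he
        have hds' : ds'.Pairwise (· < ·) := hds.tail
        have hcnds' : e ∉ ds' := fun h => lt_irrefl e ((List.pairwise_cons.mp hds).1 e h)
        have hmem' : ∀ x, x ∈ ds' ↔ x ∈ rest.drop k := by
          intro x
          constructor
          · intro hx
            have hxe : x ≠ e := fun h => hcnds' (h ▸ hx)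
            have hxl : x ∈ e :: rest := (hmem x).mp (List.mem_cons_of_mem _ hx)
            have hxr : x ∈ rest := (List.mem_cons.mp hxl).resolve_left hxe
            have : x ∈ rest.take k ++ rest.drop k := by rw [List.take_append_drop]; exact hxr
            rcases List.mem_append.mp this with h | h
            · rw [pvLeadRun_take] at h
              exact absurd (List.eq_of_mem_replicate h) hxe
            · exact h
          · intro hx
            have hxr : x ∈ rest := List.mem_of_mem_drop hx
            have hxds : x ∈ e :: ds' := (hmem x).mpr (List.mem_cons_of_mem _ hxr)
            have hxe : x ≠ e := fun h => hknm (h ▸ hx)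
            exact (List.mem_cons.mp hxds).resolve_left hxe
        have hrs' : (rest.drop k).Pairwise (· ≤ ·) := hrs.sublist (List.drop_sublist k rest)
        have hlen : (rest.drop k).length ≤ n := by
          have := List.length_drop (l := rest) (i := k)
          simp at hn ⊢; omega
        have hih := ih (rest.drop k) ds' hlen hrs' hds' hmem'
        -- unfold one step of the loop
        rw [pvLoopA]
        simp only [← hkdef]
        have hcount_head : (e :: rest).count e = k + 1 := by
          rw [List.count_cons_self, hcnt]
        have hfilt : ds'.filter (fun x => (e :: rest).count x ≤ 2)
            = ds'.filter (fun x => (rest.drop k).count x ≤ 2) := by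
          apply List.filter_congr
          intro x hx
          have hxe : x ≠ e := fun h => hcnds' (h ▸ hx)
          rw [pvCount_drop e x rest hxe]
          simp [Ne.symm hxe]
        rw [hih, List.filter_cons, hcount_head, hfilt]
        by_cases hk2 : k < 2
        · simp [hk2, show k + 1 ≤ 2 by omega]
        · simp [hk2, show ¬ (k + 1 ≤ 2) by omega]

-- ===== VERDICT (by name: the statement is the Claim_ definition above) =====
theorem check_doublons_str_spec : Claim_equal_check_doublons_str := by
  intro chaine _
  unfold Spec_check_doublons_str check_doublons_str check_doublons_str_alt
  set l := PySem.List.sorted chaine.toList (fun x => x) false with hldef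
  set ds := PySem.List.sorted (PySem.Set.ofList chaine.toList) (fun x => x) false with hdsdef
  have hl : l.Pairwise (· ≤ ·) := PySem.List.sorted_pairwise chaine.toList (fun x => x)
  have hds : ds.Pairwise (· < ·) := PySem.List.sorted_ofList_pairwise_lt chaine.toList
  have hmem : ∀ x, x ∈ ds ↔ x ∈ l := by
    intro x
    rw [hldef, hdsdef, PySem.List.mem_sorted, PySem.List.mem_sorted, PySem.Set.mem_ofList]
  have hmain := pvLoopA_eq l.length l ds le_rfl hl hds hmem
  have hcnt : ∀ c, l.count c = chaine.toList.count c := fun c =>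
    (PySem.List.sorted_perm chaine.toList (fun x => x) false).count_eq c
  rw [hmain, List.filter_congr (fun x _ => by rw [hcnt x])]
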